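-- pv_equiv track=rewrite | github.com/avs-won/leetcode_avs | main.py | solution
-- ===== SOURCE A (Python) =====
-- from collections import Counter
--
-- def solution(want, number, discount):
--         answer = 0
--
--         want_dict={}
--         want_dict=dict(zip(want,number))
--         #1단계 want와 number를 dict로 만들기
--
--         for i in range(len(discount)-9):
--             current_dis=discount[i:i+10]
--             current_cnt=Counter(current_dis)
--             #2단계 10일씩 슬라이싱해서 할인 품목 조사
--
--             for item in want_dict:
--                 if current_cnt[item] < want_dict[item]:
--                     break
--             else:
--                 answer+=1
--             #할인 품목 조사 후 want_dict와 비교해서 조건에 따라 answer 값 증가 및 패스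
--
--         return answer
-- ===== SOURCE B (Python) =====
-- def solution(want, number, discount):
--     want_dict = dict(zip(want, number))
--     n = len(discount)
--     # Precompute, per wanted item, prefix counts of its occurrences in discount,
--     # so each window test is O(1) subtractions instead of rebuilding a Counter.
--     needs = []
--     for k, v in want_dict.items():
--         p = [0]
--         t = 0
--         for d in discount:
--             t += (d == k)
--             p.append(t)
--         needs.append((p, v))
--     ans = 0
--     for i in range(n - 9):
--         if all(p[i + 10] - p[i] >= v for p, v in needs):
--             ans += 1
--     return ans
-- ===== Notes on version B (the rewrite author's own statement) =====
-- stated objective: alternative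
-- what changed: Instead of slicing each 10-day window and rebuilding a Counter per window, B precomputes one prefix-count array per wanted item and tests each window with O(1) prefix-sum subtractions per item.
import Mathlib
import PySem

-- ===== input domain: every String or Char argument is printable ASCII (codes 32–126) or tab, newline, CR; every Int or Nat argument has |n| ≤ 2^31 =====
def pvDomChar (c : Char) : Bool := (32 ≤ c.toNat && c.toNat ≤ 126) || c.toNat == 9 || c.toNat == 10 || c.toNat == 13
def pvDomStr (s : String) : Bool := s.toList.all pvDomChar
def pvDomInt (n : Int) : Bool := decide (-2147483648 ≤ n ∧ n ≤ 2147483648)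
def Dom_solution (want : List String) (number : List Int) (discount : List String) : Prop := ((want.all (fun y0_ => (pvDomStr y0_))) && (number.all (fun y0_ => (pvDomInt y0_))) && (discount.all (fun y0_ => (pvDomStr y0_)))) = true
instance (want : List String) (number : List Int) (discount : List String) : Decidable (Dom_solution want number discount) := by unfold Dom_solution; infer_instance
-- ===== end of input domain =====

-- B replaces A's per-window slice-and-Counter rebuild by per-item prefix-count arrays,
-- so each window is tested by O(1) subtractions per wanted item (objective: alternative).

-- ===== PORT A =====
-- the 'for item in want_dict: if …: break / else: answer += 1' loop
-- (want_dict[item] is ported as getD item 0: item is always a key of want_dict)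
def checkA (keys : List String) (wd cnt : PySem.Dict String Int) (answer : Int) : Int :=
  match keys with
  | [] => answer + 1
  | item :: rest =>
      if cnt.getD item 0 < wd.getD item 0 then answer else checkA rest wd cnt answer

def solution (want : List String) (number : List Int) (discount : List String) : Int :=
  let want_dict : PySem.Dict String Int :=
    (want.zip number).foldl (fun d p => d.insert p.1 p.2) PySem.Dict.empty
  (PySem.List.pyRange 0 ((discount.length : Int) - 9)).foldl
    (fun answer i =>
      let current_dis := PySem.List.slice discount (some i) (some (i + 10))
      let current_cnt := PySem.Dict.counter current_dis
      checkA want_dict.keys want_dict current_cnt answer) 0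

-- ===== PORT B =====
-- p = [0]; t = 0; for d in discount: t += (d == k); p.append(t)
def prefixOf (discount : List String) (k : String) : List Int × Int :=
  discount.foldl
    (fun pt d =>
      let t := pt.2 + (if d == k then 1 else 0)
      (pt.1 ++ [t], t)) ([0], 0)

def solution_alt (want : List String) (number : List Int) (discount : List String) : Int :=
  let want_dict : PySem.Dict String Int :=
    (want.zip number).foldl (fun d p => d.insert p.1 p.2) PySem.Dict.empty
  let n : Int := discount.length
  let needs : List (List Int × Int) :=
    want_dict.items.foldl (fun acc kv => acc ++ [((prefixOf discount kv.1).1, kv.2)]) []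
  (PySem.List.pyRange 0 (n - 9)).foldl
    (fun ans i =>
      -- p[i+10] and p[i]: the indices are always in range, so pyGetD · 0 is exact
      if needs.all (fun pv =>
          decide (PySem.List.pyGetD pv.1 (i + 10) 0 - PySem.List.pyGetD pv.1 i 0 ≥ pv.2))
      then ans + 1 else ans) 0

-- ===== PRECONDITION & SPEC =====
def Spec_solution (want : List String) (number : List Int) (discount : List String) (out : Int) : Prop := out = solution_alt want number discount
instance (want : List String) (number : List Int) (discount : List String) (out : Int) : Decidable (Spec_solution want number discount out) := by unfold Spec_solution; infer_instance

-- ===== CLAIM (what is proved, stated in full; the proofs are below) =====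
def Claim_equal_solution : Prop := ∀ (want : List String) (number : List Int) (discount : List String), Dom_solution want number discount → Spec_solution want number discount (solution want number discount)

-- ===== LEMMAS AND PROOFS =====

-- A's inner for/break/else computes 'answer + 1 iff every wanted item is covered'
lemma checkA_eq (keys : List String) (wd cnt : PySem.Dict String Int) (answer : Int) :
    checkA keys wd cnt answer =
      if keys.all (fun k => decide (wd.getD k 0 ≤ cnt.getD k 0)) then answer + 1 else answer := by
  induction keys with
  | nil => simp [checkA]
  | cons item rest ih =>
      simp only [checkA, List.all_cons, ih]
      by_cases h : cnt.getD item 0 < wd.getD item 0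
      · simp [h, not_le.mpr h]
      · simp [h, not_lt.mp h]

-- B's prefix loop, generalized over the accumulator
lemma prefixOf_gen (l : List String) (k : String) (p : List Int) (t : Int) :
    l.foldl
      (fun pt d =>
        let t := pt.2 + (if d == k then 1 else 0)
        (pt.1 ++ [t], t)) (p, t)
    = (p ++ (List.range l.length).map (fun j => t + ((l.take (j + 1)).count k : Int)),
       t + (l.count k : Int)) := by
  induction l generalizing p t with
  | nil => simp
  | cons d ls ih =>
      simp only [List.foldl_cons, ih]
      rw [List.length_cons, List.range_succ_eq_map]
      simp only [List.map_cons, List.map_map, Prod.mk.injEq]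
      refine ⟨?_, ?_⟩
      · rw [List.append_assoc, List.singleton_append]
        congr 1
        congr 1
        · rcases eq_or_ne k d with h | h
          · subst h; simp
          · simp [Ne.symm h]
        · apply List.map_congr_left
          intro j _
          simp only [Function.comp_apply, Nat.succ_eq_add_one, List.take_succ_cons,
            List.count_cons]
          rcases eq_or_ne k d with h | h
          · subst h; simp; ring
          · simp [Ne.symm h]
      · simp only [List.count_cons]
        rcases eq_or_ne k d with h | h
        · subst h; simp; ring
        · simp [Ne.symm h]

lemma prefixOf_fst (l : List String) (k : String) :
    (prefixOf l k).1 = (List.range (l.length + 1)).map (fun j => ((l.take j).count k : Int)) := by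
  rw [prefixOf, prefixOf_gen]
  rw [List.range_succ_eq_map]
  simp [List.map_map, Function.comp]

-- counts over a window as a difference of prefix counts
lemma count_window (l : List String) (k : String) (a : Nat) :
    ((l.take (a + 10)).count k : Int) - ((l.take a).count k : Int)
      = ((List.take 10 (List.drop a l)).count k : Int) := by
  rw [List.take_add, List.count_append]
  push_cast
  ring

-- ===== VERDICT (by name: the statement is the Claim_ definition above) =====

theorem solution_spec : Claim_equal_solution := by
  intro want number discount _
  unfold Spec_solution solution solution_alt
  dsimp only
  set W : PySem.Dict String Int :=
    (want.zip number).foldl (fun d p => d.insert p.1 p.2) PySem.Dict.empty with hW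
  have hnd : W.keys.Nodup := by
    rw [hW]
    exact PySem.Dict.nodup_keys_foldl_insert_key (want.zip number) Prod.fst
      (fun _ p => p.2) PySem.Dict.empty (by simp [PySem.Dict.empty, PySem.Dict.keys])
  have hitems := PySem.Dict.items_eq_map_keys W hnd 0
  -- B's needs list is a map over the items
  have hneeds :
      W.items.foldl (fun acc kv => acc ++ [((prefixOf discount kv.1).1, kv.2)]) []
        = W.keys.map (fun k => ((prefixOf discount k).1, W.getD k 0)) := by
    refine (PySem.List.foldl_append_singleton_eq_map
      (fun kv => ((prefixOf discount kv.1).1, kv.2)) W.items []).trans ?_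
    rw [hitems, List.map_map]
    simp
  rw [hneeds]
  apply PySem.List.foldl_congr_mem
  intro ans i hi
  obtain ⟨h0, hlt⟩ := PySem.List.mem_pyRange_one.mp hi
  obtain ⟨a, rfl⟩ : ∃ a : Nat, i = (a : Int) := ⟨i.toNat, (Int.toNat_of_nonneg h0).symm⟩
  have ha : a + 10 ≤ discount.length := by omega
  rw [checkA_eq]
  have hcast : ((a : Int) + 10) = ((a + 10 : Nat) : Int) := by push_cast; ring
  rw [hcast, List.all_map, PySem.List.slice_natCast]
  have harg : a + 10 - a = 10 := by omega
  rw [harg]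
  have hcond :
      (W.keys.all fun k =>
          decide (W.getD k 0 ≤ (PySem.Dict.counter (List.take 10 (List.drop a discount))).getD k 0))
        = W.keys.all
            ((fun pv => decide (PySem.List.pyGetD pv.1 ((a + 10 : Nat) : Int) 0
                - PySem.List.pyGetD pv.1 ((a : Nat) : Int) 0 ≥ pv.2))
              ∘ fun k => ((prefixOf discount k).1, W.getD k 0)) := by
    apply List.all_congr rfl
    intro k
    simp only [Function.comp_apply, PySem.List.pyGetD_natCast, PySem.Dict.getD_counter,
      prefixOf_fst]
    rw [PySem.List.getD_map_range _ _ _ _ (by omega), PySem.List.getD_map_range _ _ _ _ (by omega)]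
    rw [decide_eq_decide]
    rw [← count_window discount k a]
  rw [hcond]
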